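-- pv_equiv track=rewrite | github.com/srcoulombe/etf_comparer | utils.py | get_contiguous_truthy_segments
-- ===== SOURCE A (Python) =====
-- from typing import Mapping, List, Tuple, Callable, Union, Iterable
--
-- def get_contiguous_truthy_segments(enumerable_) -> List[Tuple[int,int]]:
--     enumerable = list(map(bool, enumerable_))
--     contigs = []
--     start = 0
--     while start < len(enumerable):
--         if enumerable[start] is False:
--             start += 1
--         else:
--             stop_exc = start
--             while stop_exc < len(enumerable) and enumerable[stop_exc]:
--                 stop_exc += 1
--             contigs.append((start, stop_exc))
--             start = stop_exc
--     return contigs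
-- ===== SOURCE B (Python) =====
-- def get_contiguous_truthy_segments(enumerable_):
--     # single edge-detecting pass instead of nested scan-and-jump loops
--     bools = list(map(bool, enumerable_))
--     contigs = []
--     seg_start = None
--     for i, b in enumerate(bools):
--         if b and seg_start is None:
--             seg_start = i
--         elif (not b) and seg_start is not None:
--             contigs.append((seg_start, i))
--             seg_start = None
--     if seg_start is not None:
--         contigs.append((seg_start, len(bools)))
--     return contigs
-- ===== Notes on version B (the rewrite author's own statement) =====
-- stated objective: simpler
-- what changed: Replaced A's nested while loops (outer index walk plus inner run-scanning while that jumps the index) by a single edge-detecting for-loop over enumerate that keeps an optional open segment start and flushes it at the end.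
import Mathlib
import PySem

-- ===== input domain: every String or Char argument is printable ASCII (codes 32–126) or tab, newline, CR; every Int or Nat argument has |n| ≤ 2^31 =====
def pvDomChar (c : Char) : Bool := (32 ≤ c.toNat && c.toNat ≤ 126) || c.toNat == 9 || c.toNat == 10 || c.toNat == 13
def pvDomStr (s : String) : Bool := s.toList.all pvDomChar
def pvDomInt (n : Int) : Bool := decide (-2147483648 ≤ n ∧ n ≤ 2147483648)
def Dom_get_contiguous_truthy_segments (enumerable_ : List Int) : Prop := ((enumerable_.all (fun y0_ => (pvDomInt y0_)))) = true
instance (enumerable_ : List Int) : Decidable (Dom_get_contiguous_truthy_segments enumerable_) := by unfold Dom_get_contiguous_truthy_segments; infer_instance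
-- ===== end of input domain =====

-- B replaces A's nested scan-and-jump while loops with one edge-detecting pass; objective: simpler.

-- ===== PORT A =====
-- bool(x) for a Python int x
def pyBool (x : Int) : Bool := x != 0

-- inner `while stop_exc < len(enumerable) and enumerable[stop_exc]: stop_exc += 1`
def aScan (e : List Bool) (i : Nat) : Nat :=
  if i < e.length ∧ e.getD i false = true then aScan e (i + 1) else i
termination_by e.length - i
decreasing_by omega

-- needed by aLoop's termination proof
theorem aScan_ge (e : List Bool) (i : Nat) : i ≤ aScan e i := by
  fun_induction aScan e i with
  | case1 i h ih => omega
  | case2 i h => omega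

theorem aScan_step (e : List Bool) (k : Nat) (h : k < e.length ∧ e.getD k false = true) :
    aScan e k = aScan e (k + 1) := by rw [aScan, if_pos h]

-- outer `while start < len(enumerable): …`
def aLoop (e : List Bool) (start : Nat) : List (Int × Int) :=
  if h : start < e.length then
    if e.getD start false = false then
      aLoop e (start + 1)
    else
      let stop := aScan e start
      ((start : Int), (stop : Int)) :: aLoop e stop
  else []
termination_by e.length - start
decreasing_by
  · omega
  · rename_i hb
    have h1 : aScan e start = aScan e (start + 1) :=
      aScan_step e start ⟨h, by simpa using hb⟩
    have h2 := aScan_ge e (start + 1)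
    omega

def get_contiguous_truthy_segments (enumerable_ : List Int) : List (Int × Int) :=
  aLoop (enumerable_.map pyBool) 0

-- ===== PORT B =====
-- structural `enumerate`
def bEnum (k : Nat) : List Bool → List (Nat × Bool)
  | [] => []
  | b :: t => (k, b) :: bEnum (k + 1) t

-- one iteration of B's for-loop body
def bStep (st : Option Nat × List (Int × Int)) (p : Nat × Bool) : Option Nat × List (Int × Int) :=
  match st, p with
  | (none, acc), (i, true) => (some i, acc)
  | (some s, acc), (i, false) => (none, acc ++ [((s : Int), (i : Int))])
  | (ss, acc), _ => (ss, acc)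

def get_contiguous_truthy_segments_alt (enumerable_ : List Int) : List (Int × Int) :=
  let bools := enumerable_.map pyBool
  match (bEnum 0 bools).foldl bStep (none, []) with
  | (some s, acc) => acc ++ [((s : Int), (bools.length : Int))]
  | (none, acc) => acc

-- ===== PRECONDITION & SPEC =====
def Spec_get_contiguous_truthy_segments (enumerable_ : List Int) (out : List (Int × Int)) : Prop := out = get_contiguous_truthy_segments_alt enumerable_
instance (enumerable_ : List Int) (out : List (Int × Int)) : Decidable (Spec_get_contiguous_truthy_segments enumerable_ out) := by unfold Spec_get_contiguous_truthy_segments; infer_instance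

-- ===== CLAIM (what is proved, stated in full; the proofs are below) =====
def Claim_equal_get_contiguous_truthy_segments : Prop := ∀ (enumerable_ : List Int), Dom_get_contiguous_truthy_segments enumerable_ → Spec_get_contiguous_truthy_segments enumerable_ (get_contiguous_truthy_segments enumerable_)

-- ===== LEMMAS AND PROOFS =====

def bFinish (e : List Bool) : Option Nat × List (Int × Int) → List (Int × Int)
  | (some s, acc) => acc ++ [((s : Int), (e.length : Int))]
  | (none, acc) => acc

theorem drop_cons_iff (e : List Bool) (k : Nat) (b : Bool) (t : List Bool) :
    e.drop k = b :: t → k < e.length ∧ e[k]? = some b ∧ e.drop (k + 1) = t := by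
  intro h
  have hk : k < e.length := by
    by_contra hk
    rw [List.drop_eq_nil_of_le (by omega)] at h; cases h
  refine ⟨hk, ?_, ?_⟩
  · have h1 : (e.drop k)[0]? = some b := by rw [h]; rfl
    rwa [List.getElem?_drop, Nat.add_zero] at h1
  · have h2 : e.drop (k + 1) = (e.drop k).drop 1 := by rw [List.drop_drop]
    simp [h2, h]

theorem getD_of_getElem? (e : List Bool) (k : Nat) (b : Bool) (h : e[k]? = some b) :
    e.getD k false = b := by simp [List.getD, h]

theorem aScan_stop (e : List Bool) (k : Nat) (h : ¬ (k < e.length ∧ e.getD k false = true)) :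
    aScan e k = k := by rw [aScan, if_neg h]

theorem aLoop_stop (e : List Bool) (k : Nat) (h : ¬ k < e.length) :
    aLoop e k = [] := by rw [aLoop, dif_neg h]

theorem aLoop_false (e : List Bool) (k : Nat) (hk : k < e.length)
    (hb : e.getD k false = false) : aLoop e k = aLoop e (k + 1) := by
  rw [aLoop, dif_pos hk, if_pos hb]

theorem aLoop_true (e : List Bool) (k : Nat) (hk : k < e.length)
    (hb : e.getD k false = true) :
    aLoop e k = ((k : Int), (aScan e k : Int)) :: aLoop e (aScan e k) := by
  rw [aLoop, dif_pos hk, if_neg (by simpa [List.getD] using hb)]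

theorem main_invariant (e : List Bool) (l : List Bool) :
    (∀ (k : Nat) (acc : List (Int × Int)), e.drop k = l →
      bFinish e ((bEnum k l).foldl bStep (none, acc)) = acc ++ aLoop e k) ∧
    (∀ (k : Nat) (s : Nat) (acc : List (Int × Int)), e.drop k = l → k ≤ e.length →
      bFinish e ((bEnum k l).foldl bStep (some s, acc)) =
        acc ++ ((s : Int), (aScan e k : Int)) :: aLoop e (aScan e k)) := by
  induction l with
  | nil =>
    constructor
    · intro k acc h
      have hk : e.length ≤ k := by
        by_contra hk
        have := List.drop_eq_nil_iff.mp h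
        omega
      simp [bEnum, bFinish, aLoop_stop e k (by omega)]
    · intro k s acc h hk
      have hk2 : e.length ≤ k := by
        by_contra hk2
        have := List.drop_eq_nil_iff.mp h
        omega
      have hkeq : k = e.length := by omega
      subst hkeq
      have hs : aScan e e.length = e.length := aScan_stop e e.length (by omega)
      simp [bEnum, bFinish, hs, aLoop_stop e e.length (by omega)]
  | cons b t ih =>
    constructor
    · intro k acc h
      obtain ⟨hk, hb0, ht⟩ := drop_cons_iff e k b t h
      have hb := getD_of_getElem? e k b hb0
      cases b with
      | false =>
        have hstep : bStep (none, acc) (k, false) = (none, acc) := rfl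
        rw [bEnum, List.foldl_cons, hstep, ih.1 (k + 1) acc ht,
          aLoop_false e k hk hb]
      | true =>
        have hstep : bStep (none, acc) (k, true) = (some k, acc) := rfl
        rw [bEnum, List.foldl_cons, hstep, ih.2 (k + 1) k acc ht (by omega),
          aLoop_true e k hk hb, aScan_step e k ⟨hk, hb⟩]
    · intro k s acc h hk'
      obtain ⟨hk, hb0, ht⟩ := drop_cons_iff e k b t h
      have hb := getD_of_getElem? e k b hb0
      cases b with
      | true =>
        have hstep : bStep (some s, acc) (k, true) = (some s, acc) := rfl
        rw [bEnum, List.foldl_cons, hstep, ih.2 (k + 1) s acc ht (by omega),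
          aScan_step e k ⟨hk, hb⟩]
      | false =>
        have hstep : bStep (some s, acc) (k, false)
            = (none, acc ++ [((s : Int), (k : Int))]) := rfl
        have hs : aScan e k = k := aScan_stop e k (by simp only [List.getD] at hb; simp [hb])
        rw [bEnum, List.foldl_cons, hstep, ih.1 (k + 1) _ ht, hs,
          ← aLoop_false e k hk hb, List.append_assoc]
        rfl

-- ===== VERDICT (by name: the statement is the Claim_ definition above) =====
theorem get_contiguous_truthy_segments_spec : Claim_equal_get_contiguous_truthy_segments := by
  intro e _
  unfold Spec_get_contiguous_truthy_segments get_contiguous_truthy_segments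
    get_contiguous_truthy_segments_alt
  have := (main_invariant (e.map pyBool) (e.map pyBool)).1 0 [] (by simp)
  rw [show (match (bEnum 0 (e.map pyBool)).foldl bStep (none, []) with
      | (some s, acc) => acc ++ [((s : Int), ((e.map pyBool).length : Int))]
      | (none, acc) => acc) =
      bFinish (e.map pyBool) ((bEnum 0 (e.map pyBool)).foldl bStep (none, [])) from rfl]
  rw [this]; simp
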